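-- pv_equiv track=rewrite | github.com/scrallex/Self-Emergent-Processor | primework/pusher.py | simulate_prime_collision
-- ===== SOURCE A (Python) =====
-- def simulate_prime_collision(n):
--     grid = [[]]  # Main line (depth 0) starts empty
--     frontiers = []  # Store frontier numbers (primes)
--
--     for num in range(2, n + 1):
--         col = 0  # Start at position 1 (index 0)
--         depth = 0  # Start at main line
--
--         # Extend grid columns if needed
--         while len(grid[depth]) <= col:
--             grid[depth].append(0)
--
--         # Try to place the number
--         while True:
--             if grid[depth][col] == 0:  # Empty spot, place the number
--                 grid[depth][col] = num
--                 # Check if this is a frontier (new column on main line)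
--                 if depth == 0 and col == len(grid[0]) - 1:
--                     frontiers.append(num)
--                 break
--             else:
--                 # Position occupied, try to push deeper
--                 depth += 1
--                 if depth >= len(grid):
--                     grid.append([0] * len(grid[0]))  # Add new depth level
--                 while len(grid[depth]) <= col:
--                     grid[depth].append(0)
--
--                 if grid[depth][col] == 0:
--                     # Push the number from (depth-1, col) to (depth, col)
--                     grid[depth][col] = grid[depth - 1][col]
--                     grid[depth - 1][col] = 0
--                     depth -= 1  # Go back up to place num
--                 else:
--                     # Can't push deeper, move right and reset depth
--                     col += 1
--                     depth = 0
--                     # Extend all rows to match the new column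
--                     for row in grid:
--                         while len(row) <= col:
--                             row.append(0)
--
--     return frontiers, grid
-- ===== SOURCE B (Python) =====
-- def simulate_prime_collision(n):
--     # Closed form: frontiers are all of 2..n; the grid stabilises into two rows
--     # (odd numbers on the main line, even numbers pushed to depth 1).
--     frontiers = list(range(2, n + 1))
--     if n < 2:
--         return frontiers, [[]]
--     if n == 2:
--         return frontiers, [[2]]
--     if n % 2 == 1:
--         return frontiers, [list(range(3, n + 1, 2)), list(range(2, n, 2))]
--     return frontiers, [list(range(3, n, 2)) + [n], list(range(2, n - 1, 2)) + [0]]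
-- ===== Notes on version B (the rewrite author's own statement) =====
-- stated objective: faster
-- what changed: Replaces the O(n^2) grid-pushing simulation with a closed-form construction: frontiers = range(2, n+1) and the final grid is two rows (odds then the last even on the main line, evens below), proved to be the simulation's fixed shape.
import Mathlib
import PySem

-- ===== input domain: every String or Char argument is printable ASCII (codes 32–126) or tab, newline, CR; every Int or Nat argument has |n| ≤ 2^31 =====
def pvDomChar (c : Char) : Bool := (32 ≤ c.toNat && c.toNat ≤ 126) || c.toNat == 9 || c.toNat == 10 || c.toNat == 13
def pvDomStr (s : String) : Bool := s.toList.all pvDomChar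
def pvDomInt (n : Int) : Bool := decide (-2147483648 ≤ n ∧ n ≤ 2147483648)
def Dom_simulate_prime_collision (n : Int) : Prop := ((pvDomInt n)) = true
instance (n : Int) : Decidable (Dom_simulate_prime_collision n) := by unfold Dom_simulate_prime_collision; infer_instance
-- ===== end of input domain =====

-- B replaces A's quadratic grid-pushing simulation by a closed-form construction of the
-- final two-row grid with frontiers = range(2, n+1); equality is proved for all n.

-- ===== PORT A =====
-- 'while len(row) <= col: row.append(0)' — the fuel col+1 only makes the recursion
-- structural; it always suffices (each append grows the row, at most col+1-len steps)
def pvExtendRowF : Nat → List Int → Nat → List Int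
  | 0, row, _ => row
  | f+1, row, col => if row.length ≤ col then pvExtendRowF f (row ++ [0]) col else row
def pvExtendRow (row : List Int) (col : Nat) : List Int := pvExtendRowF (col + 1) row col

-- the 'while True' placement loop; state (grid, frontiers, col, depth).  The fuel only
-- makes the recursion structural: it never runs out on a state this port reaches (the
-- lemmas below compute every run).  Cells are read with getD; on every reached state the
-- index is in range, exactly where Python indexes.
def pvPlaceLoop (fuel : Nat) (num : Int) (grid : List (List Int)) (frontiers : List Int)
    (col depth : Nat) : List (List Int) × List Int :=
  match fuel with
  | 0 => (grid, frontiers)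
  | fuel + 1 =>
    if (grid.getD depth []).getD col 0 = 0 then
      -- empty spot: place the number; frontier if this is a new column on the main line
      let grid' := grid.set depth ((grid.getD depth []).set col num)
      if depth = 0 ∧ col = (grid'.getD 0 []).length - 1 then (grid', frontiers ++ [num])
      else (grid', frontiers)
    else
      let depth' := depth + 1
      let grid1 := if grid.length ≤ depth' then grid ++ [List.replicate (grid.getD 0 []).length 0] else grid
      let grid2 := grid1.set depth' (pvExtendRow (grid1.getD depth' []) col)
      if (grid2.getD depth' []).getD col 0 = 0 then
        -- push the occupant from (depth'-1, col) down to (depth', col), go back up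
        let grid3 := grid2.set depth' ((grid2.getD depth' []).set col ((grid2.getD (depth'-1) []).getD col 0))
        let grid4 := grid3.set (depth'-1) ((grid3.getD (depth'-1) []).set col 0)
        pvPlaceLoop fuel num grid4 frontiers col (depth'-1)
      else
        -- can't push deeper: move right, reset depth, extend all rows
        pvPlaceLoop fuel num (grid2.map (fun r => pvExtendRow r (col+1))) frontiers (col+1) 0

-- one iteration of 'for num in range(2, n+1)'
def pvStep (st : List (List Int) × List Int) (num : Int) : List (List Int) × List Int :=
  let grid := st.1.set 0 (pvExtendRow (st.1.getD 0 []) 0)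
  pvPlaceLoop (num.toNat * 2 + 4) num grid st.2 0 0

def simulate_prime_collision (n : Int) : List Int × List (List Int) :=
  let st := (PySem.List.pyRange 2 (n+1) 1).foldl pvStep ([[]], [])
  (st.2, st.1)

-- ===== PORT B =====
def simulate_prime_collision_alt (n : Int) : List Int × List (List Int) :=
  let frontiers := PySem.List.pyRange 2 (n+1) 1
  if n < 2 then (frontiers, [[]])
  else if n = 2 then (frontiers, [[2]])
  else if PySem.Int.mod n 2 = 1 then
    (frontiers, [PySem.List.pyRange 3 (n+1) 2, PySem.List.pyRange 2 n 2])
  else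
    (frontiers, [PySem.List.pyRange 3 n 2 ++ [n], PySem.List.pyRange 2 (n-1) 2 ++ [0]])

-- ===== PRECONDITION & SPEC =====
def Spec_simulate_prime_collision (n : Int) (out : List Int × List (List Int)) : Prop := out = simulate_prime_collision_alt n
instance (n : Int) (out : List Int × List (List Int)) : Decidable (Spec_simulate_prime_collision n out) := by unfold Spec_simulate_prime_collision; infer_instance

-- ===== CLAIM (what is proved, stated in full; the proofs are below) =====
def Claim_equal_simulate_prime_collision : Prop := ∀ (n : Int), Dom_simulate_prime_collision n → Spec_simulate_prime_collision n (simulate_prime_collision n)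

-- ===== LEMMAS AND PROOFS =====

theorem pvExtendRowF_of_lt {row : List Int} {col : Nat} (f : Nat) (h : col < row.length) :
    pvExtendRowF f row col = row := by
  cases f with
  | zero => rfl
  | succ f => simp [pvExtendRowF, Nat.not_le.mpr h]

theorem pvExtendRow_of_lt {row : List Int} {col : Nat} (h : col < row.length) :
    pvExtendRow row col = row := pvExtendRowF_of_lt _ h

-- one scan iteration over an occupied column
theorem pvScanStep (num : Int) (f : List Int) (a b : List Int) (s c : Nat)
    (hc : c < a.length) (hab : b.length = a.length)
    (ha : a.getD c 0 ≠ 0) (hb : b.getD c 0 ≠ 0) :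
    pvPlaceLoop (s + 1) num [a, b] f c 0 =
      pvPlaceLoop s num [pvExtendRow a (c+1), pvExtendRow b (c+1)] f (c+1) 0 := by
  rw [pvPlaceLoop]
  simp only [List.getD_cons_zero, List.length_cons, List.length_nil]
  rw [if_neg ha]
  simp only [List.getD, List.set_cons_succ, List.set_cons_zero, List.map, Nat.add_sub_cancel,
    show ¬((0:Nat)+1+1 ≤ 0+1) by omega, if_false]
  simp only [List.getElem?_cons_succ, List.getElem?_cons_zero, Option.getD_some,
    pvExtendRow_of_lt (show c < b.length by omega)]
  rw [if_neg (by simpa [List.getD_eq_getElem?_getD] using hb)]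

theorem pvSetAppend (a : List Int) (x y : Int) : (a ++ [x]).set a.length y = a ++ [y] := by
  rw [List.set_append_right _ _ (le_refl _)]
  simp

theorem pvGetDAppend (a : List Int) (x : Int) : (a ++ [x]).getD a.length 0 = x := by
  rw [List.getD_eq_getElem _ _ (by simp)]
  simp

theorem pvGetDAppend_lt (a : List Int) (x : Int) {j : Nat} (h : j < a.length) :
    (a ++ [x]).getD j 0 = a.getD j 0 := by
  rw [List.getD_eq_getElem _ _ (by simp; omega), List.getD_eq_getElem _ _ h]
  simp [List.getElem_append_left h]

theorem pvPlace0 (num : Int) (f : List Int) (a r : List Int) (s : Nat) :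
    pvPlaceLoop (s + 1) num [a ++ [0], r] f a.length 0 =
      ([a ++ [num], r], f ++ [num]) := by
  rw [pvPlaceLoop]
  simp only [List.getD_cons_zero, pvGetDAppend, List.set_cons_zero, pvSetAppend]
  simp only [if_true]
  rw [if_pos ⟨trivial, by simp⟩]

theorem pvFinishEven (num x : Int) (f : List Int) (a b : List Int) (s : Nat)
    (hx : x ≠ 0) (hab : b.length = a.length) :
    pvPlaceLoop (s + 1 + 1) num [a ++ [x], b ++ [0]] f a.length 0 =
      ([a ++ [num], b ++ [x]], f ++ [num]) := by
  rw [pvPlaceLoop]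
  simp only [List.getD_cons_zero, pvGetDAppend]
  rw [if_neg hx]
  simp only [List.length_cons, List.length_nil, show ¬((0:Nat)+1+1 ≤ 0+1) by omega, if_false,
    List.getD, List.getElem?_cons_succ, List.getElem?_cons_zero, Option.getD_some,
    Nat.add_sub_cancel, List.set_cons_succ, List.set_cons_zero]
  rw [pvExtendRow_of_lt (show a.length < (b ++ [0]).length by simp; omega)]
  have hz : ((b ++ [0]).getD a.length 0) = 0 := by rw [← hab]; exact pvGetDAppend b 0
  rw [if_pos (by simpa [List.getD_eq_getElem?_getD] using hz)]
  have h1 : ((a ++ [x])[a.length]?.getD 0) = x := by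
    simpa [List.getD_eq_getElem?_getD] using pvGetDAppend a x
  rw [h1]
  have h2 : (b ++ [0]).set a.length x = b ++ [x] := by rw [← hab]; exact pvSetAppend b 0 x
  rw [h2, pvSetAppend]
  exact pvPlace0 num f a (b ++ [x]) s

def pvOddRow (L : Nat) : List Int := (List.range L).map (fun (i : Nat) => 3 + 2*(i:Int))
def pvEvenRow (L : Nat) : List Int := (List.range L).map (fun (i : Nat) => 2 + 2*(i:Int))
theorem pvOddRow_length (L : Nat) : (pvOddRow L).length = L := by simp [pvOddRow]
theorem pvEvenRow_length (L : Nat) : (pvEvenRow L).length = L := by simp [pvEvenRow]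
theorem pvOddRow_succ (L : Nat) : pvOddRow (L+1) = pvOddRow L ++ [3 + 2*(L:Int)] := by
  simp [pvOddRow, List.range_succ]
theorem pvEvenRow_succ (L : Nat) : pvEvenRow (L+1) = pvEvenRow L ++ [2 + 2*(L:Int)] := by
  simp [pvEvenRow, List.range_succ]
theorem pvOddRow_getD_ne {L j : Nat} (h : j < L) : (pvOddRow L).getD j 0 ≠ 0 := by
  rw [List.getD_eq_getElem _ _ (by rw [pvOddRow_length]; exact h)]
  simp only [pvOddRow, List.getElem_map]
  omega
theorem pvEvenRow_getD_ne {L j : Nat} (h : j < L) : (pvEvenRow L).getD j 0 ≠ 0 := by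
  have hl : j < (pvEvenRow L).length := by rw [pvEvenRow_length]; exact h
  rw [List.getD_eq_getElem _ _ hl]
  have hm := List.getElem_mem hl
  generalize (pvEvenRow L)[j]'hl = x at hm ⊢
  simp only [pvEvenRow, List.mem_map, List.mem_range] at hm
  obtain ⟨i, hi, he⟩ := hm
  have hi' : ∃ a : Nat, a < L ∧ i = (a:Int) := by simpa using hi
  obtain ⟨a', _, ha'⟩ := hi'
  omega
theorem pvExtendRow_append_zero {row : List Int} {col : Nat} (h : row.length = col) :
    pvExtendRow row col = row ++ [0] := by
  rw [pvExtendRow, pvExtendRowF]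
  simp only [h, le_refl, if_true]
  exact pvExtendRowF_of_lt _ (by simp [List.length_append, h])

theorem pvScan (num : Int) (f : List Int) (a b : List Int) (hab : b.length = a.length) :
    ∀ (d s c : Nat), c + d + 1 ≤ a.length →
    (∀ j, c ≤ j → j < c + d + 1 → a.getD j 0 ≠ 0) →
    (∀ j, c ≤ j → j < c + d + 1 → b.getD j 0 ≠ 0) →
    pvPlaceLoop (s + d + 1) num [a, b] f c 0 =
      pvPlaceLoop s num [pvExtendRow a (c + d + 1), pvExtendRow b (c + d + 1)] f (c + d + 1) 0 := by
  intro d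
  induction d with
  | zero =>
      intro s c h1 ha hb
      simpa using pvScanStep num f a b s c (by omega) hab
        (ha c le_rfl (by omega)) (hb c le_rfl (by omega))
  | succ d ih =>
      intro s c h1 ha hb
      have h2 := pvScanStep num f a b (s + d + 1) c (by omega) hab
        (ha c le_rfl (by omega)) (hb c le_rfl (by omega))
      rw [show s + (d+1) + 1 = (s + d + 1) + 1 by ring, h2,
        pvExtendRow_of_lt (show c + 1 < a.length by omega),
        pvExtendRow_of_lt (show c + 1 < b.length by omega)]
      have h3 := ih s (c+1) (by omega)
        (fun j hj1 hj2 => ha j (by omega) (by omega))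
        (fun j hj1 hj2 => hb j (by omega) (by omega))
      rw [show c + 1 + d + 1 = c + (d + 1) + 1 by ring] at h3
      exact h3

theorem pvStepOdd (num : Int) (L : Nat) (hL : 1 ≤ L) (hfuel : L + 1 ≤ num.toNat * 2 + 4) (f : List Int) :
    pvStep ([pvOddRow L, pvEvenRow L], f) num =
      ([pvOddRow L ++ [num], pvEvenRow L ++ [0]], f ++ [num]) := by
  unfold pvStep
  simp only [List.getD_cons_zero, List.set_cons_zero,
    pvExtendRow_of_lt (show 0 < (pvOddRow L).length by rw [pvOddRow_length]; omega)]
  rw [show num.toNat * 2 + 4 = ((num.toNat * 2 + 4 - L - 1) + 1) + (L - 1) + 1 by omega]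
  rw [pvScan num f _ _ (by rw [pvOddRow_length, pvEvenRow_length]) (L-1) _ 0
    (by rw [pvOddRow_length]; omega)
    (fun j _ hj => pvOddRow_getD_ne (by omega))
    (fun j _ hj => pvEvenRow_getD_ne (by omega))]
  rw [show 0 + (L - 1) + 1 = L by omega,
    pvExtendRow_append_zero (pvOddRow_length L), pvExtendRow_append_zero (pvEvenRow_length L)]
  have := pvPlace0 num f (pvOddRow L) (pvEvenRow L ++ [0]) (num.toNat * 2 + 4 - L - 1)
  rw [pvOddRow_length] at this
  exact this

theorem pvStepEven (num x : Int) (M : Nat) (hM : 1 ≤ M) (hx : x ≠ 0)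
    (hfuel : M + 2 ≤ num.toNat * 2 + 4) (f : List Int) :
    pvStep ([pvOddRow M ++ [x], pvEvenRow M ++ [0]], f) num =
      ([pvOddRow M ++ [num], pvEvenRow M ++ [x]], f ++ [num]) := by
  unfold pvStep
  simp only [List.getD_cons_zero, List.set_cons_zero,
    pvExtendRow_of_lt (show 0 < (pvOddRow M ++ [x]).length by simp)]
  rw [show num.toNat * 2 + 4 = ((num.toNat * 2 + 4 - M - 2) + 1 + 1) + (M - 1) + 1 by omega]
  rw [pvScan num f _ _ (by simp [pvOddRow_length, pvEvenRow_length]) (M-1) _ 0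
    (by simp [pvOddRow_length])
    (fun j _ hj => by
      rw [pvGetDAppend_lt _ _ (by rw [pvOddRow_length]; omega)]
      exact pvOddRow_getD_ne (by omega))
    (fun j _ hj => by
      rw [pvGetDAppend_lt _ _ (by rw [pvEvenRow_length]; omega)]
      exact pvEvenRow_getD_ne (by omega))]
  rw [show 0 + (M - 1) + 1 = M by omega,
    pvExtendRow_of_lt (show M < (pvOddRow M ++ [x]).length by simp [pvOddRow_length]),
    pvExtendRow_of_lt (show M < (pvEvenRow M ++ [0]).length by simp [pvEvenRow_length])]
  have := pvFinishEven num x f (pvOddRow M) (pvEvenRow M) (num.toNat * 2 + 4 - M - 2) hx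
    (by rw [pvOddRow_length, pvEvenRow_length])
  rw [pvOddRow_length] at this
  exact this

def pvGridAfter (k : Nat) : List (List Int) :=
  if k < 2 then [[]] else if k = 2 then [[2]]
  else if k % 2 = 1 then [pvOddRow ((k-1)/2), pvEvenRow ((k-1)/2)]
  else [pvOddRow (k/2 - 1) ++ [(k:Int)], pvEvenRow (k/2 - 1) ++ [0]]

theorem pvMain : ∀ (k : Nat), 2 ≤ k →
    (PySem.List.pyRange 2 ((k:Int)+1) 1).foldl pvStep ([[]], []) =
      (pvGridAfter k, PySem.List.pyRange 2 ((k:Int)+1) 1) := by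
  intro k hk
  induction k, hk using Nat.le_induction with
  | base => decide
  | succ k hk ih =>
      push_cast
      rw [PySem.List.pyRange_one_succ_right (show (2:Int) ≤ (k:Int)+1 by omega),
        List.foldl_append, ih]
      simp only [List.foldl_cons, List.foldl_nil]
      rcases Nat.even_or_odd k with ⟨L, hL⟩ | ⟨L, hL⟩
      · -- k even
        by_cases hk2 : k = 2
        · subst hk2; decide
        · obtain ⟨M, hM⟩ : ∃ M, L = M + 1 := ⟨L - 1, by omega⟩
          have hg : pvGridAfter k = [pvOddRow M ++ [(k:Int)], pvEvenRow M ++ [0]] := by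
            unfold pvGridAfter
            rw [if_neg (by omega), if_neg (by omega), if_neg (by omega),
              show k/2 - 1 = M by omega]
          have hg' : pvGridAfter (k+1) = [pvOddRow (M+1), pvEvenRow (M+1)] := by
            unfold pvGridAfter
            rw [if_neg (by omega), if_neg (by omega), if_pos (by omega),
              show (k+1-1)/2 = M+1 by omega]
          rw [hg, hg', pvStepEven ((k:Int)+1) (k:Int) M (by omega)
            (by omega) (by omega) _]
          rw [pvOddRow_succ, pvEvenRow_succ,
            show 3 + 2*(M:Int) = (k:Int)+1 by omega,
            show 2 + 2*(M:Int) = (k:Int) by omega]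
      · -- k odd
        have hL1 : 1 ≤ L := by omega
        have hg : pvGridAfter k = [pvOddRow L, pvEvenRow L] := by
          unfold pvGridAfter
          rw [if_neg (by omega), if_neg (by omega), if_pos (by omega),
            show (k-1)/2 = L by omega]
        have hg' : pvGridAfter (k+1) = [pvOddRow L ++ [((k:Int)+1)], pvEvenRow L ++ [0]] := by
          unfold pvGridAfter
          rw [if_neg (by omega), if_neg (by omega), if_neg (by omega),
            show (k+1)/2 - 1 = L by omega]
          push_cast
          rfl
        rw [hg, hg', pvStepOdd ((k:Int)+1) L hL1 (by omega) _]

theorem pvOddRange (L : Nat) (hL : 1 ≤ L) :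
    PySem.List.pyRange 3 (2*(L:Int)+2) 2 = pvOddRow L := by
  rw [PySem.List.pyRange_of_pos _ _ (by norm_num)]
  rw [if_pos (by omega), show ((2*(L:Int)+2-3+2-1)/2).toNat = L by omega]
  rfl

theorem pvEvenRange (L : Nat) (hL : 1 ≤ L) :
    PySem.List.pyRange 2 (2*(L:Int)+1) 2 = pvEvenRow L := by
  rw [PySem.List.pyRange_of_pos _ _ (by norm_num)]
  rw [if_pos (by omega), show ((2*(L:Int)+1-2+2-1)/2).toNat = L by omega]
  rfl

theorem pvSpec : ∀ (n : Int), simulate_prime_collision n = simulate_prime_collision_alt n := by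
  intro n
  by_cases h2 : n < 2
  · unfold simulate_prime_collision simulate_prime_collision_alt
    rw [PySem.List.pyRange_one_eq_nil (by omega), if_pos h2]
    rfl
  · obtain ⟨k, hk⟩ : ∃ k : Nat, n = (k:Nat) := ⟨n.toNat, by omega⟩
    subst hk
    have hk2 : 2 ≤ k := by omega
    unfold simulate_prime_collision simulate_prime_collision_alt
    rw [pvMain k hk2, if_neg h2]
    by_cases hke : (k:Int) = 2
    · rw [if_pos hke]
      have : k = 2 := by omega
      subst this
      rfl
    · rw [if_neg hke]
      rcases Nat.even_or_odd k with ⟨L, hL⟩ | ⟨L, hL⟩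
      · -- k even, k ≥ 4
        have hmod : ¬ PySem.Int.mod (k:Int) 2 = 1 := by
          rw [PySem.Int.mod_eq_emod_of_pos (by norm_num : (0:Int) < 2)]; omega
        rw [if_neg hmod]
        have hg : pvGridAfter k = [pvOddRow (L-1) ++ [(k:Int)], pvEvenRow (L-1) ++ [0]] := by
          unfold pvGridAfter
          rw [if_neg (by omega), if_neg (by omega), if_neg (by omega),
            show k/2 - 1 = L - 1 by omega]
        have e1 : (k:Int) = 2*((L-1:Nat):Int)+2 := by omega
        have e2 : (k:Int)-1 = 2*((L-1:Nat):Int)+1 := by omega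
        rw [hg, show PySem.List.pyRange 3 (k:Int) 2 = pvOddRow (L-1) by
            rw [e1, pvOddRange (L-1) (by omega)],
          show PySem.List.pyRange 2 ((k:Int)-1) 2 = pvEvenRow (L-1) by
            rw [e2, pvEvenRange (L-1) (by omega)]]
      · -- k odd, k ≥ 3
        have hmod : PySem.Int.mod (k:Int) 2 = 1 := by
          rw [PySem.Int.mod_eq_emod_of_pos (by norm_num : (0:Int) < 2)]; omega
        rw [if_pos hmod]
        have hg : pvGridAfter k = [pvOddRow L, pvEvenRow L] := by
          unfold pvGridAfter
          rw [if_neg (by omega), if_neg (by omega), if_pos (by omega),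
            show (k-1)/2 = L by omega]
        have e1 : (k:Int)+1 = 2*(L:Int)+2 := by omega
        have e2 : (k:Int) = 2*(L:Int)+1 := by omega
        rw [hg, show PySem.List.pyRange 3 ((k:Int)+1) 2 = pvOddRow L by
            rw [e1, pvOddRange L (by omega)],
          show PySem.List.pyRange 2 (k:Int) 2 = pvEvenRow L by
            rw [e2, pvEvenRange L (by omega)]]

-- ===== VERDICT (by name: the statement is the Claim_ definition above) =====
theorem simulate_prime_collision_spec : Claim_equal_simulate_prime_collision := by
  intro n _
  unfold Spec_simulate_prime_collision
  exact pvSpec n
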